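-- pv_equiv track=rewrite | github.com/oldo1013/RedRoverSchool | codewars1.py | pipe_fix
-- ===== SOURCE A (Python) =====
-- def pipe_fix(nums):
--     newnums = [nums[0]]
--     for i in nums[1:]:
--         if i - newnums[-1] == 1:
--             newnums.append(i)
--         else:
--             for j in range (newnums[-1]+1, i+1):
--                 newnums.append(j)
--     return newnums
-- ===== SOURCE B (Python) =====
-- def pipe_fix(nums):
--     start = nums[0]
--     return list(range(start, max(nums) + 1))
-- ===== Notes on version B (the rewrite author's own statement) =====
-- stated objective: simpler
-- what changed: Replaces the incremental gap-filling scan (an interpreted loop appending one sub-range per element) with a single built-in max() pass followed by one range construction from the first element up to that maximum.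
import Mathlib
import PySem

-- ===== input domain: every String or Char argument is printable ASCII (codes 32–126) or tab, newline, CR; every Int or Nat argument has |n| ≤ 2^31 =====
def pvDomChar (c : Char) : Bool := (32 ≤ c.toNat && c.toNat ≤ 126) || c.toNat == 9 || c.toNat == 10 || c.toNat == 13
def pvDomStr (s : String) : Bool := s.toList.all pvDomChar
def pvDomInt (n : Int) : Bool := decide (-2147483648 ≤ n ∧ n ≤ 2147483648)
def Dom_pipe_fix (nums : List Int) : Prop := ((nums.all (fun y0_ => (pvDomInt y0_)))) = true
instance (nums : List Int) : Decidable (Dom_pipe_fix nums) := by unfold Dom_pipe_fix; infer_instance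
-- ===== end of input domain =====

-- B replaces A's incremental gap-filling scan with one max pass and a single range construction (simpler).
-- ===== PORT A =====
def pvStepA (acc : List Int) (i : Int) : List Int :=
  if i - acc.getLast! = 1 then acc ++ [i]
  else acc ++ PySem.List.pyRange (acc.getLast! + 1) (i + 1) 1

def pipe_fix (nums : List Int) : List Int :=
  match nums with
  | [] => []          -- Python raises IndexError here; excluded by Pre_
  | h :: t => t.foldl pvStepA [h]

-- ===== PORT B =====
def pipe_fix_alt (nums : List Int) : List Int :=
  match nums with
  | [] => []          -- Python raises IndexError here; excluded by Pre_
  | h :: t => PySem.List.pyRange h ((t.foldl max h) + 1) 1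

-- ===== PRECONDITION & SPEC =====
-- Pre_ excludes only the empty list, on which Python A raises IndexError.
def Pre_pipe_fix (nums : List Int) : Prop := nums ≠ []
instance (nums : List Int) : Decidable (Pre_pipe_fix nums) := by unfold Pre_pipe_fix; infer_instance
def pvWitness_pipe_fix : List Int := [1, 4, 2, 6]
def Spec_pipe_fix (nums : List Int) (out : List Int) : Prop := out = pipe_fix_alt nums
instance (nums : List Int) (out : List Int) : Decidable (Spec_pipe_fix nums out) := by unfold Spec_pipe_fix; infer_instance

-- ===== CLAIM (what is proved, stated in full; the proofs are below) =====
def Claim_equal_pipe_fix : Prop := ∀ (nums : List Int), Dom_pipe_fix nums → Pre_pipe_fix nums → Spec_pipe_fix nums (pipe_fix nums)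

-- ===== LEMMAS AND PROOFS =====

-- ===== VERDICT (by name: the statement is the Claim_ definition above) =====
theorem pvGetLast_range (s L : Int) (h : s ≤ L) :
    (PySem.List.pyRange s (L + 1) 1).getLast! = L := by
  rw [PySem.List.pyRange_one_succ_right h]
  simp

theorem pvStepA_range (s L i : Int) (hs : s ≤ L) :
    pvStepA (PySem.List.pyRange s (L + 1) 1) i = PySem.List.pyRange s (max L i + 1) 1 := by
  unfold pvStepA
  rw [pvGetLast_range s L hs]
  split_ifs with h1
  · have hi : i = L + 1 := by omega
    subst hi
    rw [max_eq_right (by omega), ← PySem.List.pyRange_one_succ_right (a:=s) (b:=L+1) (by omega)]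
  · by_cases h2 : i ≤ L
    · rw [max_eq_left h2, PySem.List.pyRange_one_eq_nil (a:=L+1) (b:=i+1) (by omega), List.append_nil]
    · have : L + 1 ≤ i := by omega
      rw [max_eq_right (by omega),
        PySem.List.pyRange_one_append s (L+1) (i+1) (by omega) (by omega)]

theorem pvFoldA_range (t : List Int) : ∀ (s L : Int), s ≤ L →
    t.foldl pvStepA (PySem.List.pyRange s (L + 1) 1)
      = PySem.List.pyRange s ((t.foldl max L) + 1) 1 := by
  induction t with
  | nil => intro s L _; rfl
  | cons i t ih =>
    intro s L hs
    simp only [List.foldl_cons]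
    rw [pvStepA_range s L i hs, ih s (max L i) (le_trans hs (le_max_left _ _))]

theorem pipe_fix_spec : Claim_equal_pipe_fix := by
  intro nums _ hpre
  unfold Spec_pipe_fix
  cases nums with
  | nil => exact absurd rfl hpre
  | cons h t =>
    show List.foldl pvStepA [h] t = PySem.List.pyRange h ((t.foldl max h) + 1) 1
    rw [show [h] = PySem.List.pyRange h (h + 1) 1 from
        (PySem.List.pyRange_one_singleton h).symm,
      pvFoldA_range t h h le_rfl]
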